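-- pv_equiv track=rewrite | github.com/lorangriel/feudal-simulator | src/noble_staff.py | calculate_staff_cost_totals
-- ===== SOURCE A (Python) =====
-- from typing import Any, Dict, Iterable, List, Mapping, Tuple
--
-- _ROLE_COST_BASE: Dict[str, int] = {
--     "Kammarherre": 2,
--     "Hovmästare": 2,
--     "Köksmästare": 2,
--     "Kock": 3,
--     "Kammarjungfru": 3,
--     "Kallskänka": 2,
--     "Kokerka": 2,
--     "Tjänare": 2,
--     "Hushållspersonal": 1,
-- }
--
-- _ROLE_COST_LYX: Dict[str, int] = {
--     "Kammarherre": 2,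
--     "Hovmästare": 2,
--     "Köksmästare": 1,
-- }
--
-- StaffCounts = Dict[str, int]
--
-- RoleCostTotals = Dict[str, Tuple[int, int | None]]
--
-- def get_role_costs(role: str) -> Tuple[int, int | None]:
--     """Return the base and lyx per-person cost for a role."""
--
--     return _ROLE_COST_BASE.get(role, 0), _ROLE_COST_LYX.get(role)
--
-- def calculate_staff_cost_totals(
--     counts: StaffCounts,
-- ) -> Tuple[RoleCostTotals, int, int]:
--     """Calculate base and lyx totals for each role and overall sums."""
--
--     per_role: RoleCostTotals = {}
--     base_total = 0
--     lyx_total = 0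
--     for role, count in counts.items():
--         if count <= 0:
--             continue
--         base_cost, lyx_cost = get_role_costs(role)
--         role_base_total = base_cost * count
--         role_lyx_total: int | None
--         if lyx_cost is None:
--             role_lyx_total = None
--         else:
--             role_lyx_total = lyx_cost * count
--             lyx_total += role_lyx_total
--         per_role[role] = (role_base_total, role_lyx_total)
--         base_total += role_base_total
--     return per_role, base_total, lyx_total
-- ===== SOURCE B (Python) =====
-- from typing import Dict, Tuple
--
-- _ROLE_COST_BASE: Dict[str, int] = {
--     "Kammarherre": 2,
--     "Hovmästare": 2,
--     "Köksmästare": 2,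
--     "Kock": 3,
--     "Kammarjungfru": 3,
--     "Kallskänka": 2,
--     "Kokerka": 2,
--     "Tjänare": 2,
--     "Hushållspersonal": 1,
-- }
--
-- _ROLE_COST_LYX: Dict[str, int] = {
--     "Kammarherre": 2,
--     "Hovmästare": 2,
--     "Köksmästare": 1,
-- }
--
--
-- def _solve(items):
--     """Divide and conquer: returns (entry list, base total, lyx total) for a slice."""
--     if not items:
--         return [], 0, 0
--     if len(items) == 1:
--         role, count = items[0]
--         if count <= 0:
--             return [], 0, 0
--         base = _ROLE_COST_BASE.get(role, 0) * count
--         lyx = _ROLE_COST_LYX.get(role)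
--         if lyx is None:
--             return [(role, (base, None))], base, 0
--         return [(role, (base, lyx * count))], base, lyx * count
--     mid = len(items) // 2
--     e1, b1, l1 = _solve(items[:mid])
--     e2, b2, l2 = _solve(items[mid:])
--     return e1 + e2, b1 + b2, l1 + l2
--
--
-- def calculate_staff_cost_totals(counts):
--     """Divide-and-conquer over the items; the dict is built once at the end."""
--     entries, base_total, lyx_total = _solve(list(counts.items()))
--     return dict(entries), base_total, lyx_total
-- ===== Notes on version B (the rewrite author's own statement) =====
-- stated objective: alternative
-- what changed: A is a single fused loop that mutates a dict and two running totals; B is a divide-and-conquer recursion that splits the items in half, combines (entry-list concatenation, total addition), and builds the result dict once from the combined entry list at the end.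
import Mathlib
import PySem

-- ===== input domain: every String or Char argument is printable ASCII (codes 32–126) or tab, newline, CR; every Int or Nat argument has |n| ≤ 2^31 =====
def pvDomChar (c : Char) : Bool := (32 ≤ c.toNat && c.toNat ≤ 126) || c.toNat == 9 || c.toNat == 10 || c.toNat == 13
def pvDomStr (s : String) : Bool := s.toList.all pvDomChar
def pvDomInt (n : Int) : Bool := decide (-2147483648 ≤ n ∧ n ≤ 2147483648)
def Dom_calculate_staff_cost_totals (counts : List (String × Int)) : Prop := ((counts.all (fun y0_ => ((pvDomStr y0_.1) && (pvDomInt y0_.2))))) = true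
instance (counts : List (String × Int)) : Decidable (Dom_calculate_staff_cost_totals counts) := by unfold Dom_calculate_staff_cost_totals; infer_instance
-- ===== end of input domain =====

-- B replaces A's single fused accumulating loop by a divide-and-conquer recursion (split the item list in half, combine entry lists and totals, build the dict once at the end); alternative decomposition, equal return value on all inputs.


-- ===== PORT A =====
def roleCostBase : PySem.Dict String Int :=
  PySem.Dict.ofList [("Kammarherre", 2), ("Hovmästare", 2), ("Köksmästare", 2), ("Kock", 3),
    ("Kammarjungfru", 3), ("Kallskänka", 2), ("Kokerka", 2), ("Tjänare", 2), ("Hushållspersonal", 1)]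

def roleCostLyx : PySem.Dict String Int :=
  PySem.Dict.ofList [("Kammarherre", 2), ("Hovmästare", 2), ("Köksmästare", 1)]

def get_role_costs (role : String) : Int × Option Int :=
  (roleCostBase.getD role 0, roleCostLyx.get? role)

-- one iteration of A's fused loop over (per_role, base_total, lyx_total)
def stepA (st : PySem.Dict String (Int × Option Int) × Int × Int) (rc : String × Int) :
    PySem.Dict String (Int × Option Int) × Int × Int :=
  let (per_role, base_total, lyx_total) := st
  let role := rc.1
  let count := rc.2
  if count ≤ 0 then (per_role, base_total, lyx_total)
  else
    let costs := get_role_costs role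
    let base_cost := costs.1
    let lyx_cost := costs.2
    let role_base_total := base_cost * count
    match lyx_cost with
    | none =>
        (per_role.insert role (role_base_total, none), base_total + role_base_total, lyx_total)
    | some lc =>
        let role_lyx_total := lc * count
        (per_role.insert role (role_base_total, some role_lyx_total),
         base_total + role_base_total, lyx_total + role_lyx_total)

def calculate_staff_cost_totals (counts : List (String × Int)) :
    (List (String × Int × Option Int)) × Int × Int :=
  let st := counts.foldl stepA (PySem.Dict.empty, 0, 0)
  (st.1.items, st.2.1, st.2.2)

-- ===== PORT B =====
-- B's divide-and-conquer helper _solve: (entry list, base total, lyx total) for a slice.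
-- (Python slices items[:mid]/items[mid:] are List.take/List.drop.)
def solveB : List (String × Int) → (List (String × Int × Option Int)) × Int × Int
  | [] => ([], 0, 0)
  | [p] =>
      if p.2 ≤ 0 then ([], 0, 0)
      else
        let base := roleCostBase.getD p.1 0 * p.2
        match roleCostLyx.get? p.1 with
        | none => ([(p.1, base, none)], base, 0)
        | some lyx => ([(p.1, base, some (lyx * p.2))], base, lyx * p.2)
  | a :: b :: rest =>
      let items := a :: b :: rest
      let mid := items.length / 2
      let r1 := solveB (items.take mid)
      let r2 := solveB (items.drop mid)
      (r1.1 ++ r2.1, r1.2.1 + r2.2.1, r1.2.2 + r2.2.2)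
termination_by items => items.length
decreasing_by
  · simp [List.length_take]; omega
  · simp [List.length_drop]; omega

def calculate_staff_cost_totals_alt (counts : List (String × Int)) :
    (List (String × Int × Option Int)) × Int × Int :=
  let r := solveB counts
  ((PySem.Dict.ofList r.1).items, r.2.1, r.2.2)

-- ===== PRECONDITION & SPEC =====
def Spec_calculate_staff_cost_totals (counts : List (String × Int)) (out : (List (String × Int × Option Int)) × Int × Int) : Prop := out = calculate_staff_cost_totals_alt counts
instance (counts : List (String × Int)) (out : (List (String × Int × Option Int)) × Int × Int) : Decidable (Spec_calculate_staff_cost_totals counts out) := by unfold Spec_calculate_staff_cost_totals; infer_instance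

-- ===== CLAIM (what is proved, stated in full; the proofs are below) =====
def Claim_equal_calculate_staff_cost_totals : Prop := ∀ (counts : List (String × Int)), Dom_calculate_staff_cost_totals counts → Spec_calculate_staff_cost_totals counts (calculate_staff_cost_totals counts)

-- ===== LEMMAS AND PROOFS =====

-- the per-role entries that a positive-count prefix contributes, as a plain list
def entriesE (counts : List (String × Int)) : List (String × Int × Option Int) :=
  (counts.filter (fun p => !(p.2 ≤ 0))).map (fun p =>
    (p.1, roleCostBase.getD p.1 0 * p.2,
      match roleCostLyx.get? p.1 with
      | none => none
      | some lc => some (lc * p.2)))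

def sumB (es : List (String × Int × Option Int)) : Int := (es.map (·.2.1)).sum

def sumL (es : List (String × Int × Option Int)) : Int :=
  (es.map (fun e => match e.2.2 with | none => (0 : Int) | some l => l)).sum

def insE (d : PySem.Dict String (Int × Option Int)) (es : List (String × Int × Option Int)) :
    PySem.Dict String (Int × Option Int) :=
  es.foldl (fun d e => d.insert e.1 e.2) d

lemma entriesE_append (xs ys : List (String × Int)) :
    entriesE (xs ++ ys) = entriesE xs ++ entriesE ys := by
  simp [entriesE]

lemma solveB_eq_aux (n : Nat) : ∀ (counts : List (String × Int)), counts.length ≤ n →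
    solveB counts = (entriesE counts, sumB (entriesE counts), sumL (entriesE counts)) := by
  induction n with
  | zero =>
      intro counts h
      match counts with
      | [] => simp [solveB, entriesE, sumB, sumL]
      | p :: rest => simp at h
  | succ n ih =>
      intro counts h
      match counts with
      | [] => simp [solveB, entriesE, sumB, sumL]
      | [p] =>
          by_cases hc : p.2 ≤ 0
          · simp [solveB, hc, entriesE, List.filter, sumB, sumL]
          · cases hlyx : roleCostLyx.get? p.1 <;>
              simp [solveB, hc, hlyx, entriesE, List.filter, sumB, sumL]
      | a :: b :: rest =>
          rw [solveB]
          have hlen : (a :: b :: rest).length = rest.length + 2 := by simp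
          have h1 := ih ((a :: b :: rest).take ((a :: b :: rest).length / 2))
            (by simp [List.length_take]; omega)
          have h2 := ih ((a :: b :: rest).drop ((a :: b :: rest).length / 2))
            (by simp at h ⊢; omega)
          have hsplit : entriesE ((a :: b :: rest).take ((a :: b :: rest).length / 2)) ++
              entriesE ((a :: b :: rest).drop ((a :: b :: rest).length / 2)) =
              entriesE (a :: b :: rest) := by
            rw [← entriesE_append, List.take_append_drop]
          simp only [h1, h2]
          refine Prod.ext ?_ (Prod.ext ?_ ?_)
          · exact hsplit
          · rw [← hsplit]; simp [sumB]
          · rw [← hsplit]; simp [sumL]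

lemma solveB_eq (counts : List (String × Int)) :
    solveB counts = (entriesE counts, sumB (entriesE counts), sumL (entriesE counts)) :=
  solveB_eq_aux counts.length counts le_rfl

lemma stepA_eq (st : PySem.Dict String (Int × Option Int) × Int × Int) (rc : String × Int) :
    stepA st rc =
      (insE st.1 (entriesE [rc]),
       st.2.1 + sumB (entriesE [rc]),
       st.2.2 + sumL (entriesE [rc])) := by
  obtain ⟨d, b, l⟩ := st
  by_cases hc : rc.2 ≤ 0
  · simp [stepA, hc, entriesE, List.filter, sumB, sumL, insE]
  · cases hlyx : roleCostLyx.get? rc.1 <;>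
      simp [stepA, hc, get_role_costs, hlyx, entriesE, List.filter, sumB, sumL, insE]

lemma foldA_eq (counts : List (String × Int)) :
    ∀ (st : PySem.Dict String (Int × Option Int) × Int × Int),
      counts.foldl stepA st =
        (insE st.1 (entriesE counts),
         st.2.1 + sumB (entriesE counts),
         st.2.2 + sumL (entriesE counts)) := by
  induction counts with
  | nil => intro st; simp [entriesE, sumB, sumL, insE]
  | cons rc rest ih =>
      intro st
      rw [List.foldl_cons, ih, stepA_eq]
      by_cases hc : rc.2 ≤ 0 <;>
      · cases hlyx : roleCostLyx.get? rc.1 <;>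
          simp [entriesE, List.filter, hc, hlyx, sumB, sumL, insE, add_assoc]

lemma ofList_eq_insE (es : List (String × Int × Option Int)) :
    PySem.Dict.ofList es = insE PySem.Dict.empty es := rfl

-- ===== VERDICT (by name: the statement is the Claim_ definition above) =====
theorem calculate_staff_cost_totals_spec : Claim_equal_calculate_staff_cost_totals := by
  intro counts _
  unfold Spec_calculate_staff_cost_totals
  simp [calculate_staff_cost_totals, calculate_staff_cost_totals_alt, foldA_eq, solveB_eq,
    ofList_eq_insE]
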